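-- pv_equiv track=rewrite | github.com/ilo-lang/ilo | research/explorations/bench-realistic/strings.py | bench
-- ===== SOURCE A (Python) =====
-- def bench(n):
--     s = 0
--     for i in range(n):
--         t = "item-" + str(i)
--         parts = t.split("-")
--         j = "_".join(parts)
--         s += len(j)
--     return s
-- ===== SOURCE B (Python) =====
-- def bench(n):
--     # Each item contributes len("item_" + str(i)) = 5 + number of digits of i.
--     # Sum of digit counts over 0..n-1 = n + sum over powers p=10,100,... of (n - p) for p < n.
--     if n <= 0:
--         return 0
--     s = 6 * n
--     p = 10
--     while p < n:
--         s += n - p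
--         p *= 10
--     return s
-- ===== Notes on version B (the rewrite author's own statement) =====
-- stated objective: faster
-- what changed: Replaces the per-item loop that builds, splits and joins a string for every i with a closed form 6n plus a sum of (n - 10^k) over the O(log n) powers of ten below n.
import Mathlib
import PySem

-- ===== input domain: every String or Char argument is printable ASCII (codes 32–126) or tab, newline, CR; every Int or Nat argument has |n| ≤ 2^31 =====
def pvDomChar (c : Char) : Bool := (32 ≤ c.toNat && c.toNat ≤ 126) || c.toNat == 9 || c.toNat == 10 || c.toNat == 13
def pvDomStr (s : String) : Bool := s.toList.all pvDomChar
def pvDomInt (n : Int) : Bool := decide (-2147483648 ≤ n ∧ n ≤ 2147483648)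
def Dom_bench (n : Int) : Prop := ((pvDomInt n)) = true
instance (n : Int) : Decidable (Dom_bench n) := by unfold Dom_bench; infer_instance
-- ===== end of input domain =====

-- B replaces A's per-item build/split/join string loop by the closed form
-- 6*n plus the sum of (n - 10^k) over the powers of ten below n (faster in a timing run).

-- ===== PORT A =====
def bench (n : Int) : Int :=
  (PySem.List.pyRange 0 n 1).foldl
    (fun s i =>
      let t : String := "item-" ++ PySem.Int.toStr i
      let parts : List String := (PySem.Str.split? t "-").getD []
      let j : String := PySem.Str.join "_" parts
      s + PySem.Str.len j) 0

-- ===== PORT B =====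
-- the 'while p < n' loop of Source B; p stays positive (10, 100, …), which also gives termination
def benchAltLoop (n : Int) (p : Nat) (hp : 0 < p) (total : Int) : Int :=
  if h : (p : Int) < n then
    benchAltLoop n (p * 10) (by omega) (total + (n - p))
  else total
termination_by (n - p).toNat
decreasing_by omega

def bench_alt (n : Int) : Int :=
  if n ≤ 0 then 0 else benchAltLoop n 10 (by omega) (6 * n)

-- ===== PRECONDITION & SPEC =====
def Spec_bench (n : Int) (out : Int) : Prop := out = bench_alt n
instance (n : Int) (out : Int) : Decidable (Spec_bench n out) := by unfold Spec_bench; infer_instance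

-- ===== CLAIM (what is proved, stated in full; the proofs are below) =====
def Claim_equal_bench : Prop := ∀ (n : Int), Dom_bench n → Spec_bench n (bench n)

-- ===== LEMMAS AND PROOFS =====

-- digits of a nonnegative number: no '-' appears, and the length is log10 + 1
set_option maxHeartbeats 2000000 in
theorem pv_digitChar_ne_dash (n : Nat) : Nat.digitChar n ≠ '-' := by
  rcases n with _|_|_|_|_|_|_|_|_|_|_|_|_|_|_|_|n <;> simp [Nat.digitChar]

theorem pv_toDigitsCore_no_dash (f : Nat) : ∀ (n : Nat) (l : List Char),
    (∀ c ∈ l, c ≠ '-') → ∀ c ∈ Nat.toDigitsCore 10 f n l, c ≠ '-' := by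
  induction f with
  | zero => intro n l hl c hc; exact hl c hc
  | succ f ih =>
    intro n l hl c hc
    simp only [Nat.toDigitsCore] at hc
    split at hc
    · rcases List.mem_cons.mp hc with h | h
      · subst h; exact pv_digitChar_ne_dash _
      · exact hl c h
    · refine ih _ _ ?_ c hc
      intro d hd
      rcases List.mem_cons.mp hd with h | h
      · subst h; exact pv_digitChar_ne_dash _
      · exact hl d h

theorem pv_toDigitsCore_len (f : Nat) : ∀ (n : Nat) (l : List Char), n < f →
    (Nat.toDigitsCore 10 f n l).length = Nat.log 10 n + 1 + l.length := by
  induction f with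
  | zero => intro n l h; omega
  | succ f ih =>
    intro n l h
    simp only [Nat.toDigitsCore]
    split
    · rename_i h10
      have : n < 10 := by omega
      have hlog : Nat.log 10 n = 0 := Nat.log_eq_zero_iff.mpr (Or.inl this)
      simp only [List.length_cons, hlog]
      omega
    · rename_i h10
      have hn10 : 10 ≤ n := by
        rcases Nat.lt_or_ge n 10 with h' | h'
        · exact absurd (Nat.div_eq_of_lt h') h10
        · exact h'
      have hdivlt : n / 10 < f := by
        have : n / 10 < n := Nat.div_lt_self (by omega) (by omega)
        omega
      rw [ih (n / 10) _ hdivlt]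
      have hlog : Nat.log 10 (n / 10) = Nat.log 10 n - 1 := Nat.log_div_base 10 n
      have hpos : 0 < Nat.log 10 n := Nat.log_pos (by norm_num) hn10
      simp only [List.length_cons]
      omega

theorem pv_toChars_len (i : Int) (hi : 0 ≤ i) :
    (PySem.Int.toChars i).length = Nat.log 10 i.toNat + 1 := by
  unfold PySem.Int.toChars
  rw [if_neg (by omega)]
  unfold Nat.toDigits
  simpa using pv_toDigitsCore_len (i.toNat + 1) i.toNat [] (by omega)

theorem pv_toChars_no_dash (i : Int) (hi : 0 ≤ i) : '-' ∉ PySem.Int.toChars i := by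
  unfold PySem.Int.toChars
  rw [if_neg (by omega)]
  intro hmem
  exact pv_toDigitsCore_no_dash _ _ _ (by simp) '-' hmem rfl

-- splitOn.go stepping lemmas
theorem pv_go_step_ne (f : Nat) (c : Char) (rest cur : List Char) (acc : List (List Char))
    (h : c ≠ '-') :
    PySem.Chars.splitOn.go ['-'] (f + 1) (c :: rest) cur acc =
      PySem.Chars.splitOn.go ['-'] f rest (c :: cur) acc := by
  rw [PySem.Chars.splitOn.go.eq_def]
  simp [List.isPrefixOf, Ne.symm h]

theorem pv_go_step_sep (f : Nat) (rest cur : List Char) (acc : List (List Char)) :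
    PySem.Chars.splitOn.go ['-'] (f + 1) ('-' :: rest) cur acc =
      PySem.Chars.splitOn.go ['-'] f rest [] (cur.reverse :: acc) := by
  rw [PySem.Chars.splitOn.go.eq_def]
  simp [List.isPrefixOf]

theorem pv_go_no_sep (f : Nat) : ∀ (l cur : List Char) (acc : List (List Char)), '-' ∉ l →
    PySem.Chars.splitOn.go ['-'] f l cur acc = acc.reverse ++ [cur.reverse ++ l] := by
  induction f with
  | zero =>
    intro l cur acc _
    rw [PySem.Chars.splitOn.go.eq_def]
    cases l <;> simp
  | succ f ih =>
    intro l cur acc hl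
    cases l with
    | nil => rw [PySem.Chars.splitOn.go.eq_def]; simp
    | cons c rest =>
      have hc : c ≠ '-' := fun h => hl (h ▸ List.mem_cons_self)
      rw [pv_go_step_ne f c rest cur acc hc, ih rest _ acc (fun h => hl (List.mem_cons_of_mem _ h))]
      simp

theorem pv_splitOn_item (l : List Char) (hl : '-' ∉ l) :
    PySem.Chars.splitOn (['i','t','e','m','-'] ++ l) ['-'] = [['i','t','e','m'], l] := by
  unfold PySem.Chars.splitOn
  have hlen : (['i','t','e','m','-'] ++ l).length + 1 = (l.length + 1) + 1 + 1 + 1 + 1 + 1 := by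
    simp
  rw [hlen]
  simp only [List.cons_append, List.nil_append]
  rw [pv_go_step_ne _ _ _ _ _ (by decide), pv_go_step_ne _ _ _ _ _ (by decide),
    pv_go_step_ne _ _ _ _ _ (by decide), pv_go_step_ne _ _ _ _ _ (by decide),
    pv_go_step_sep, pv_go_no_sep _ _ _ _ hl]
  simp

-- per-item contribution of A's loop body
theorem pv_item_len (i : Int) (hi : 0 ≤ i) :
    PySem.Str.len (PySem.Str.join "_"
      ((PySem.Str.split? ("item-" ++ PySem.Int.toStr i) "-").getD [])) =
      6 + (Nat.log 10 i.toNat : Int) := by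
  have htl : ("item-" ++ PySem.Int.toStr i).toList = ['i','t','e','m','-'] ++ PySem.Int.toChars i := by
    rw [String.toList_append, PySem.Int.toList_toStr,
      show "item-".toList = ['i','t','e','m','-'] from by decide]
  have hsplit : PySem.Str.split? ("item-" ++ PySem.Int.toStr i) "-" =
      some [String.ofList ['i','t','e','m'], String.ofList (PySem.Int.toChars i)] := by
    unfold PySem.Str.split? PySem.Chars.split?
    rw [show ("-" : String).toList = ['-'] from by decide, htl,
      pv_splitOn_item _ (pv_toChars_no_dash i hi)]
    simp
  rw [hsplit]
  simp only [Option.getD_some]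
  unfold PySem.Str.len
  rw [PySem.Str.toList_join]
  have : ("_" : String).toList = ['_'] := by decide
  rw [this]
  simp [PySem.Chars.join, List.intercalate, pv_toChars_len i hi]
  ring_nf

-- the common closed form both sides are reduced to
def pvSumLog (m : Nat) : Nat := ∑ i ∈ Finset.range m, Nat.log 10 i

theorem pv_bench_nat (m : Nat) : bench (m : Int) = 6 * m + (pvSumLog m : Int) := by
  induction m with
  | zero =>
    unfold bench
    rw [PySem.List.pyRange_one_eq_nil (by norm_num)]
    simp [pvSumLog]
  | succ m ih =>
    unfold bench
    have hcast : ((m + 1 : Nat) : Int) = (m : Int) + 1 := by push_cast; ring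
    rw [hcast, PySem.List.pyRange_one_succ_right (by positivity), List.foldl_append]
    unfold bench at ih
    rw [List.foldl_cons, List.foldl_nil, ih]
    simp only []
    rw [pv_item_len (m : Int) (by positivity)]
    unfold pvSumLog
    rw [Finset.sum_range_succ]
    push_cast
    rw [Int.toNat_natCast]
    ring

-- loop characterisation of B
theorem pv_loop_spec (K : Nat) : ∀ (n : Int) (p : Nat) (hp : 0 < p) (t : Int),
    n ≤ (p : Int) * 10 ^ K →
    benchAltLoop n p hp t = t + ∑ k ∈ Finset.range K, ((n.toNat - p * 10 ^ k : Nat) : Int) := by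
  induction K with
  | zero =>
    intro n p hp t hK
    unfold benchAltLoop
    rw [dif_neg (by simpa using hK)]
    simp
  | succ K ih =>
    intro n p hp t hK
    by_cases h : (p : Int) < n
    · rw [benchAltLoop]
      rw [dif_pos h]
      rw [ih n (p * 10) (by omega) _ (by push_cast at hK ⊢; rw [pow_succ] at hK; linarith)]
      rw [Finset.sum_range_succ']
      have h1 : ((n.toNat - p * 10 ^ 0 : Nat) : Int) = n - p := by
        simp only [pow_zero, Nat.mul_one]
        omega
      have h2 : ∀ k, p * 10 * 10 ^ k = p * 10 ^ (k + 1) := by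
        intro k; rw [pow_succ]; ring
      simp only [h2, h1]
      ring
    · rw [benchAltLoop]
      rw [dif_neg h]
      have hsum : ∑ k ∈ Finset.range (K + 1), ((n.toNat - p * 10 ^ k : Nat) : Int) = 0 := by
        apply Finset.sum_eq_zero
        intro k _
        have hle : n.toNat ≤ p * 10 ^ k := by
          have h10 : 0 < 10 ^ k := Nat.pow_pos (by omega)
          have : n ≤ (p : Int) := by omega
          calc n.toNat ≤ p := by omega
            _ ≤ p * 10 ^ k := Nat.le_mul_of_pos_right p h10
        simp [Nat.sub_eq_zero_of_le hle]
      rw [hsum]; ring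

-- counting: sum of log10 over range m equals the sum over powers of ten
theorem pv_filter_card (m i : Nat) (hi : i < m) :
    (Finset.filter (fun k => 10 * 10 ^ k ≤ i) (Finset.range m)).card = Nat.log 10 i := by
  have hset : Finset.filter (fun k => 10 * 10 ^ k ≤ i) (Finset.range m) =
      Finset.range (Nat.log 10 i) := by
    ext k
    simp only [Finset.mem_filter, Finset.mem_range]
    constructor
    · rintro ⟨_, hk⟩
      have hpow : 10 ^ (k + 1) ≤ i := by rw [pow_succ]; linarith [hk]
      have hne : i ≠ 0 := by
        intro h
        rw [h] at hpow
        have hp : 0 < 10 ^ (k + 1) := Nat.pow_pos (by omega)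
        omega
      have := (Nat.le_log_iff_pow_le (by norm_num) hne).mpr hpow
      omega
    · intro hk
      have hne : i ≠ 0 := by
        intro h; rw [h] at hk; simp [Nat.log_zero_right] at hk
      have hpow : 10 ^ (k + 1) ≤ i := (Nat.le_log_iff_pow_le (by norm_num) hne).mp (by omega)
      constructor
      · have : Nat.log 10 i ≤ i := Nat.log_le_self 10 i
        omega
      · rw [pow_succ] at hpow; linarith [hpow]
  rw [hset, Finset.card_range]

theorem pv_sumLog_eq (m : Nat) :
    pvSumLog m = ∑ k ∈ Finset.range m, (m - 10 * 10 ^ k) := by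
  unfold pvSumLog
  have h1 : ∑ i ∈ Finset.range m, Nat.log 10 i =
      ∑ i ∈ Finset.range m, (Finset.filter (fun k => 10 * 10 ^ k ≤ i) (Finset.range m)).card := by
    apply Finset.sum_congr rfl
    intro i hi
    rw [pv_filter_card m i (Finset.mem_range.mp hi)]
  rw [h1]
  have h2 : ∀ k : Nat, Finset.filter (fun i => 10 * 10 ^ k ≤ i) (Finset.range m) =
      Finset.Ico (10 * 10 ^ k) m := by
    intro k
    ext i
    simp only [Finset.mem_filter, Finset.mem_range, Finset.mem_Ico]
    tauto
  calc ∑ i ∈ Finset.range m, (Finset.filter (fun k => 10 * 10 ^ k ≤ i) (Finset.range m)).card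
      = ∑ i ∈ Finset.range m, ∑ k ∈ Finset.range m, if 10 * 10 ^ k ≤ i then 1 else 0 := by
        refine Finset.sum_congr rfl fun i _ => ?_
        rw [Finset.card_filter]
    _ = ∑ k ∈ Finset.range m, ∑ i ∈ Finset.range m, if 10 * 10 ^ k ≤ i then 1 else 0 :=
        Finset.sum_comm
    _ = ∑ k ∈ Finset.range m, (m - 10 * 10 ^ k) := by
        refine Finset.sum_congr rfl fun k _ => ?_
        rw [← Finset.card_filter, h2 k, Nat.card_Ico]

theorem pv_bench_alt_nat (m : Nat) (hm : 0 < m) :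
    bench_alt (m : Int) = 6 * m + (pvSumLog m : Int) := by
  have h1 : m < 10 ^ m := Nat.lt_pow_self (by norm_num)
  have h2 : (10:Nat) ^ m ≤ 10 * 10 ^ m := by omega
  have hK : (m : Int) ≤ ((10 : Nat) : Int) * 10 ^ m := by exact_mod_cast le_trans h1.le h2
  unfold bench_alt
  rw [if_neg (by omega), pv_loop_spec m (m : Int) 10 (by omega) (6 * m) hK, pv_sumLog_eq]
  have hsum : ∑ k ∈ Finset.range m, ((((m : Int)).toNat - 10 * 10 ^ k : Nat) : Int)
      = ∑ k ∈ Finset.range m, ((m - 10 * 10 ^ k : Nat) : Int) := by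
    refine Finset.sum_congr rfl fun k _ => ?_
    rw [Int.toNat_natCast]
  rw [hsum, Nat.cast_sum]

-- ===== VERDICT (by name: the statement is the Claim_ definition above) =====
theorem bench_spec : Claim_equal_bench := by
  intro n _
  unfold Spec_bench
  by_cases h : n ≤ 0
  · unfold bench bench_alt
    rw [PySem.List.pyRange_one_eq_nil h, if_pos h]
    rfl
  · have hm : n = (n.toNat : Int) := by omega
    rw [hm, pv_bench_nat, pv_bench_alt_nat n.toNat (by omega)]
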